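-- pv_equiv track=rewrite | github.com/betonowylukasz/Halma | heuristic.py | wide_and_height
-- ===== SOURCE A (Python) =====
-- def wide_and_height(board):
--     min_width1 = 16
--     max_width1 = -1
--     min_height1 = 16
--     max_height1 = -1
--     min_width2 = 16
--     max_width2 = -1
--     min_height2 = 16
--     max_height2 = -1
--     for row, y in zip(board, range(16)):
--         for square, x in zip(row, range(16)):
--             if square == 1:
--                 if x < min_width1: min_width1 = x
--                 if x > max_width1: max_width1 = x
--                 if y < min_height1: min_height1 = y
--                 if y > max_height1: max_height1 = y
--             elif square == 2:
--                 if x < min_width2: min_width2 = x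
--                 if x > max_width2: max_width2 = x
--                 if y < min_height2: min_height2 = y
--                 if y > max_height2: max_height2 = y
--     return min_width1 - max_width1 + min_height1 - max_height1 - min_width2 + max_width2 - min_height2 + max_height2
-- ===== SOURCE B (Python) =====
-- def _extent(vals):
--     return min(vals, default=16) - max(vals, default=-1)
--
--
-- def wide_and_height(board):
--     cells = [(x, y, sq)
--              for y, row in enumerate(board[:16])
--              for x, sq in enumerate(row[:16])]
--     xs1 = [x for (x, y, sq) in cells if sq == 1]
--     ys1 = [y for (x, y, sq) in cells if sq == 1]
--     xs2 = [x for (x, y, sq) in cells if sq == 2]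
--     ys2 = [y for (x, y, sq) in cells if sq == 2]
--     return _extent(xs1) + _extent(ys1) - _extent(xs2) - _extent(ys2)
-- ===== Notes on version B (the rewrite author's own statement) =====
-- stated objective: alternative
-- what changed: A threads eight running min/max variables through a stateful nested scan; B collects the coordinate lists of each piece type once (flattened enumerate comprehension) and aggregates each with min/max built-ins using the sentinel defaults 16 and -1, combining per-axis extents via a helper.
import Mathlib
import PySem

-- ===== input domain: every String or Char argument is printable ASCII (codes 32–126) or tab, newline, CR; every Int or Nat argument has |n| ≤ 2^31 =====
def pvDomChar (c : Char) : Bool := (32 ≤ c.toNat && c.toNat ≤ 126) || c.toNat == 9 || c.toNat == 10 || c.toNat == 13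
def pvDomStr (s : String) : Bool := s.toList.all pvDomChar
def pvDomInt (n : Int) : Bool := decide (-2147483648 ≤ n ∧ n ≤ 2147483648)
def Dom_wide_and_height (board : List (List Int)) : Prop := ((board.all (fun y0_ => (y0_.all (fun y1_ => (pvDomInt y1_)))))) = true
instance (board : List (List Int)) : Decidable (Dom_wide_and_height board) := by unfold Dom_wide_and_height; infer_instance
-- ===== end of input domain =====

-- B replaces A's stateful eight-variable scan by collect-coordinates-then-aggregate with min/max defaults (objective: alternative decomposition, same cost).


-- ===== PORT A =====
-- A's state: (min_width1, max_width1, min_height1, max_height1, min_width2, max_width2, min_height2, max_height2)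
abbrev pvS := Int × Int × Int × Int × Int × Int × Int × Int

-- the body of A's inner loop (the if-chains, verbatim)
def pvStepA (s : pvS) (square x y : Int) : pvS :=
  if square = 1 then
    (if x < s.1 then x else s.1, if x > s.2.1 then x else s.2.1,
     if y < s.2.2.1 then y else s.2.2.1, if y > s.2.2.2.1 then y else s.2.2.2.1,
     s.2.2.2.2.1, s.2.2.2.2.2.1, s.2.2.2.2.2.2.1, s.2.2.2.2.2.2.2)
  else if square = 2 then
    (s.1, s.2.1, s.2.2.1, s.2.2.2.1,
     if x < s.2.2.2.2.1 then x else s.2.2.2.2.1, if x > s.2.2.2.2.2.1 then x else s.2.2.2.2.2.1,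
     if y < s.2.2.2.2.2.2.1 then y else s.2.2.2.2.2.2.1, if y > s.2.2.2.2.2.2.2 then y else s.2.2.2.2.2.2.2)
  else s

def wide_and_height (board : List (List Int)) : Int :=
  let s := (board.zip (PySem.List.pyRange 0 16 1)).foldl
    (fun s ry => (ry.1.zip (PySem.List.pyRange 0 16 1)).foldl
      (fun s sx => pvStepA s sx.1 sx.2 ry.2) s)
    (16, -1, 16, -1, 16, -1, 16, -1)
  s.1 - s.2.1 + s.2.2.1 - s.2.2.2.1 - s.2.2.2.2.1 + s.2.2.2.2.2.1 - s.2.2.2.2.2.2.1 + s.2.2.2.2.2.2.2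

-- ===== PORT B =====
-- _extent(vals) = min(vals, default=16) - max(vals, default=-1)
def pvExtent (vals : List Int) : Int :=
  PySem.List.minD vals (fun v => v) 16 - PySem.List.maxD vals (fun v => v) (-1)

def wide_and_height_alt (board : List (List Int)) : Int :=
  let cells := (PySem.List.enumerate (PySem.List.slice board none (some 16))).flatMap
    (fun yr => (PySem.List.enumerate (PySem.List.slice yr.2 none (some 16))).map
      (fun xs => (xs.1, yr.1, xs.2)))
  let xs1 := (cells.filter (fun c => c.2.2 == 1)).map (fun c => c.1)
  let ys1 := (cells.filter (fun c => c.2.2 == 1)).map (fun c => c.2.1)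
  let xs2 := (cells.filter (fun c => c.2.2 == 2)).map (fun c => c.1)
  let ys2 := (cells.filter (fun c => c.2.2 == 2)).map (fun c => c.2.1)
  pvExtent xs1 + pvExtent ys1 - pvExtent xs2 - pvExtent ys2

-- ===== PRECONDITION & SPEC =====
def Spec_wide_and_height (board : List (List Int)) (out : Int) : Prop := out = wide_and_height_alt board
instance (board : List (List Int)) (out : Int) : Decidable (Spec_wide_and_height board out) := by unfold Spec_wide_and_height; infer_instance

-- ===== CLAIM (what is proved, stated in full; the proofs are below) =====
def Claim_equal_wide_and_height : Prop := ∀ (board : List (List Int)), Dom_wide_and_height board → Spec_wide_and_height board (wide_and_height board)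

-- ===== LEMMAS AND PROOFS =====

-- pvStepA, seen as a fold step over flattened (x, y, square) cells
def pvStep (s : pvS) (c : Int × Int × Int) : pvS := pvStepA s c.2.2 c.1 c.2.1

def pvXs (v : Int) (L : List (Int × Int × Int)) : List Int :=
  (L.filter (fun c => c.2.2 == v)).map (fun c => c.1)

def pvYs (v : Int) (L : List (Int × Int × Int)) : List Int :=
  (L.filter (fun c => c.2.2 == v)).map (fun c => c.2.1)

lemma pv_ite_lt (x m : Int) : (if x < m then x else m) = min m x := by
  rw [min_def]; split_ifs <;> omega

lemma pv_ite_gt (x m : Int) : (if x > m then x else m) = max m x := by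
  rw [max_def]; split_ifs <;> omega

-- the eight state variables of A's loop are running min/max folds over the filtered coordinate lists
lemma pv_foldl_step (L : List (Int × Int × Int)) (s : pvS) :
    L.foldl pvStep s =
      ((pvXs 1 L).foldl min s.1, (pvXs 1 L).foldl max s.2.1,
       (pvYs 1 L).foldl min s.2.2.1, (pvYs 1 L).foldl max s.2.2.2.1,
       (pvXs 2 L).foldl min s.2.2.2.2.1, (pvXs 2 L).foldl max s.2.2.2.2.2.1,
       (pvYs 2 L).foldl min s.2.2.2.2.2.2.1, (pvYs 2 L).foldl max s.2.2.2.2.2.2.2) := by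
  induction L generalizing s with
  | nil => simp [pvXs, pvYs]
  | cons c t ih =>
    obtain ⟨x, y, sq⟩ := c
    by_cases h1 : sq = 1
    · simp [pvXs, pvYs, h1, List.foldl_cons, pvStep, pvStepA, pv_ite_lt, pv_ite_gt, ih]
    · by_cases h2 : sq = 2
      · simp [pvXs, pvYs, h2, List.foldl_cons, pvStep, pvStepA, pv_ite_lt, pv_ite_gt, ih]
      · simp [pvXs, pvYs, h1, h2, List.foldl_cons, pvStep, pvStepA, ih]

-- zip with range(a, a+n) is enumerate of the first n elements, components swapped
lemma pv_zip_pyRange {α : Type} (l : List α) (a : Int) (n : Nat) :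
    l.zip (PySem.List.pyRange a (a + n) 1) =
      (PySem.List.enumerate (l.take n) a).map (fun p => (p.2, p.1)) := by
  induction l generalizing a n with
  | nil => simp
  | cons h t ih =>
    cases n with
    | zero => simp [PySem.List.pyRange_one_eq_nil (le_refl a)]
    | succ m =>
      rw [PySem.List.pyRange_one_cons (by push_cast; omega)]
      have : a + ((m + 1 : Nat) : Int) = (a + 1) + (m : Nat) := by push_cast; omega
      rw [this]
      simp [PySem.List.enumerate_cons, ih]

-- min(vals, default=16) is the running-min loop seeded with 16 when every value is ≤ 16
lemma pv_minD_foldl (l : List Int) (h : ∀ v ∈ l, v ≤ 16) :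
    l.foldl min 16 = PySem.List.minD l (fun v => v) 16 := by
  cases l with
  | nil => simp [PySem.List.minD_nil]
  | cons x t =>
    rw [PySem.List.minD_id_cons]
    have : min (16 : Int) x = x := by
      have := h x (by simp); omega
    simp [List.foldl_cons, this]

lemma pv_maxD_foldl (l : List Int) (h : ∀ v ∈ l, -1 ≤ v) :
    l.foldl max (-1) = PySem.List.maxD l (fun v => v) (-1) := by
  cases l with
  | nil => simp [PySem.List.maxD_nil]
  | cons x t =>
    rw [PySem.List.maxD_id_cons]
    have : max (-1 : Int) x = x := by
      have := h x (by simp); omega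
    simp [List.foldl_cons, this]

-- the flattened cell list of B (proof-side name for the 'cells' let of wide_and_height_alt)
def pvCells (board : List (List Int)) : List (Int × Int × Int) :=
  (PySem.List.enumerate (PySem.List.slice board none (some 16))).flatMap
    (fun yr => (PySem.List.enumerate (PySem.List.slice yr.2 none (some 16))).map
      (fun xs => (xs.1, yr.1, xs.2)))

lemma pv_slice16 {α : Type} (l : List α) :
    PySem.List.slice l none (some 16) = l.take 16 := by
  simp [pysem]

lemma pv_zip16 {α : Type} (l : List α) :
    l.zip (PySem.List.pyRange 0 16 1) =
      (PySem.List.enumerate (l.take 16) 0).map (fun p => (p.2, p.1)) := by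
  have h := pv_zip_pyRange l 0 16
  simpa using h

-- A's nested loop is the fold of pvStep over B's flattened cell list
lemma pv_A_fold (board : List (List Int)) (s : pvS) :
    (board.zip (PySem.List.pyRange 0 16 1)).foldl
      (fun s ry => (ry.1.zip (PySem.List.pyRange 0 16 1)).foldl
        (fun s sx => pvStepA s sx.1 sx.2 ry.2) s) s
    = (pvCells board).foldl pvStep s := by
  rw [pvCells, List.foldl_flatMap]
  simp only [pv_slice16]
  rw [pv_zip16, List.foldl_map]
  apply PySem.List.foldl_congr_mem
  intro acc yr _
  rw [pv_zip16, List.foldl_map, List.foldl_map]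
  rfl

-- bounds on the coordinates appearing in the cell list
lemma pv_cells_bound (board : List (List Int)) :
    ∀ c ∈ pvCells board, 0 ≤ c.1 ∧ c.1 ≤ 15 ∧ 0 ≤ c.2.1 ∧ c.2.1 ≤ 15 := by
  intro c hc
  rw [pvCells] at hc
  simp only [List.mem_flatMap, List.mem_map, pv_slice16] at hc
  obtain ⟨yr, hyr, xs, hxs, rfl⟩ := hc
  rw [PySem.List.mem_enumerate_iff] at hyr hxs
  obtain ⟨ky, hky, rfl⟩ := hyr
  obtain ⟨kx, hkx, rfl⟩ := hxs
  have h1 : ky < 16 := lt_of_lt_of_le hky (by simp)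
  have h2 : kx < 16 := lt_of_lt_of_le hkx (by simp)
  simp only []
  omega

lemma pv_xs_bound (board : List (List Int)) (v : Int) :
    ∀ w ∈ pvXs v (pvCells board), 0 ≤ w ∧ w ≤ 15 := by
  intro w hw
  rw [pvXs] at hw
  simp only [List.mem_map, List.mem_filter] at hw
  obtain ⟨c, ⟨hc, _⟩, rfl⟩ := hw
  have := pv_cells_bound board c hc
  omega

lemma pv_ys_bound (board : List (List Int)) (v : Int) :
    ∀ w ∈ pvYs v (pvCells board), 0 ≤ w ∧ w ≤ 15 := by
  intro w hw
  rw [pvYs] at hw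
  simp only [List.mem_map, List.mem_filter] at hw
  obtain ⟨c, ⟨hc, _⟩, rfl⟩ := hw
  have := pv_cells_bound board c hc
  omega

-- ===== VERDICT (by name: the statement is the Claim_ definition above) =====
theorem wide_and_height_spec : Claim_equal_wide_and_height := by
  intro board _
  show wide_and_height board = wide_and_height_alt board
  rw [wide_and_height, wide_and_height_alt]
  rw [pv_A_fold, pv_foldl_step]
  have hx1 := pv_xs_bound board 1
  have hy1 := pv_ys_bound board 1
  have hx2 := pv_xs_bound board 2
  have hy2 := pv_ys_bound board 2
  simp only [pvExtent]
  rw [pv_minD_foldl _ (fun v hv => by have := hx1 v hv; omega),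
      pv_maxD_foldl _ (fun v hv => by have := hx1 v hv; omega),
      pv_minD_foldl _ (fun v hv => by have := hy1 v hv; omega),
      pv_maxD_foldl _ (fun v hv => by have := hy1 v hv; omega),
      pv_minD_foldl _ (fun v hv => by have := hx2 v hv; omega),
      pv_maxD_foldl _ (fun v hv => by have := hx2 v hv; omega),
      pv_minD_foldl _ (fun v hv => by have := hy2 v hv; omega),
      pv_maxD_foldl _ (fun v hv => by have := hy2 v hv; omega)]
  simp only [pvXs, pvYs, pvCells]
  ring
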